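-- pv_equiv track=rewrite | github.com/robertcprice/oNeura | src/oneuro/quantum/subatomic.py | _filled_subshells
-- ===== SOURCE A (Python) =====
-- _AUFBAU_ORDER: tuple[tuple[int, str, int], ...] = (
--     (1, "s", 2),
--     (2, "s", 2),
--     (2, "p", 6),
--     (3, "s", 2),
--     (3, "p", 6),
--     (4, "s", 2),
--     (3, "d", 10),
--     (4, "p", 6),
--     (5, "s", 2),
--     (4, "d", 10),
--     (5, "p", 6),
--     (6, "s", 2),
--     (4, "f", 14),
--     (5, "d", 10),
--     (6, "p", 6),
--     (7, "s", 2),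
--     (5, "f", 14),
--     (6, "d", 10),
--     (7, "p", 6),
-- )
--
-- def _filled_subshells(electron_count: int) -> list[tuple[int, str, int]]:
--     if electron_count < 0:
--         raise ValueError(f"electron count must be non-negative, got {electron_count}")
--     remaining = electron_count
--     occupancies: list[tuple[int, str, int]] = []
--     for n, subshell, capacity in _AUFBAU_ORDER:
--         if remaining <= 0:
--             break
--         occupancy = min(capacity, remaining)
--         occupancies.append((n, subshell, occupancy))
--         remaining -= occupancy
--     if remaining:
--         raise ValueError(f"Aufbau ordering exhausted with {remaining} electrons left")
--     return occupancies
-- ===== SOURCE B (Python) =====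
-- _AUFBAU_ORDER: tuple[tuple[int, str, int], ...] = (
--     (1, "s", 2),
--     (2, "s", 2),
--     (2, "p", 6),
--     (3, "s", 2),
--     (3, "p", 6),
--     (4, "s", 2),
--     (3, "d", 10),
--     (4, "p", 6),
--     (5, "s", 2),
--     (4, "d", 10),
--     (5, "p", 6),
--     (6, "s", 2),
--     (4, "f", 14),
--     (5, "d", 10),
--     (6, "p", 6),
--     (7, "s", 2),
--     (5, "f", 14),
--     (6, "d", 10),
--     (7, "p", 6),
-- )
--
-- # cumulative capacity BEFORE each subshell, and the grand total (118)
-- _CUM_BEFORE: tuple[int, ...] = tuple(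
--     sum(c for _, _, c in _AUFBAU_ORDER[:i]) for i in range(len(_AUFBAU_ORDER))
-- )
-- _TOTAL: int = sum(c for _, _, c in _AUFBAU_ORDER)
--
--
-- def _filled_subshells(electron_count: int) -> list[tuple[int, str, int]]:
--     if electron_count < 0:
--         raise ValueError(f"electron count must be non-negative, got {electron_count}")
--     if electron_count > _TOTAL:
--         raise ValueError(
--             f"Aufbau ordering exhausted with {electron_count - _TOTAL} electrons left"
--         )
--     return [
--         (n, subshell, min(capacity, electron_count - before))
--         for (n, subshell, capacity), before in zip(_AUFBAU_ORDER, _CUM_BEFORE)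
--         if electron_count > before
--     ]
-- ===== Notes on version B (the rewrite author's own statement) =====
-- stated objective: simpler
-- what changed: Replaced the stateful loop with a running 'remaining' counter and a break by precomputed prefix sums of capacities: each subshell's occupancy is a pure clamp min(capacity, electron_count - cumulative_before), built in one stateless comprehension after two up-front range checks.
import Mathlib
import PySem

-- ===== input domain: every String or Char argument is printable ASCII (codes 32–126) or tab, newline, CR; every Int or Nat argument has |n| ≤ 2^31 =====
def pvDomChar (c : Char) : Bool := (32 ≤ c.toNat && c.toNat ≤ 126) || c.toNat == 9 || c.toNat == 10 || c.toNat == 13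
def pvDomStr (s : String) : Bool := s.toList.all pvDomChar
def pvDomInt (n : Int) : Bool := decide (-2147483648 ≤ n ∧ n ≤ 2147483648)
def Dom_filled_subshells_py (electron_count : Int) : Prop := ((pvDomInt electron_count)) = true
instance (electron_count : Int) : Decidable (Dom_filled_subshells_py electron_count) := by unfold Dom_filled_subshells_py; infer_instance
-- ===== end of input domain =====

-- B changes A's stateful 'remaining'-counter loop (with break) into a stateless
-- prefix-sum/clamp comprehension; objective: simpler.

-- the shared module constant _AUFBAU_ORDER
def aufbauOrder : List (Int × String × Int) :=
  [(1, "s", 2), (2, "s", 2), (2, "p", 6), (3, "s", 2), (3, "p", 6), (4, "s", 2),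
   (3, "d", 10), (4, "p", 6), (5, "s", 2), (4, "d", 10), (5, "p", 6), (6, "s", 2),
   (4, "f", 14), (5, "d", 10), (6, "p", 6), (7, "s", 2), (5, "f", 14), (6, "d", 10),
   (7, "p", 6)]

-- ===== PORT A =====
-- the for-loop with its running 'remaining' and break, as structural recursion
def fillLoopA : List (Int × String × Int) → Int → List (Int × String × Int)
  | [], _ => []
  | (n, subshell, capacity) :: rest, remaining =>
      if remaining ≤ 0 then []   -- break
      else
        let occupancy := min capacity remaining
        (n, subshell, occupancy) :: fillLoopA rest (remaining - occupancy)

-- Python raises ValueError when electron_count < 0 or electrons are left over; those inputs are outside Pre_.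
def filled_subshells_py (electron_count : Int) : List (Int × String × Int) :=
  fillLoopA aufbauOrder electron_count

-- ===== PORT B =====
-- _CUM_BEFORE: cumulative capacity before each subshell
def cumBefore : List Int :=
  (List.range aufbauOrder.length).map
    (fun i => ((aufbauOrder.take i).map (fun t => t.2.2)).sum)

-- the stateless comprehension over zip(_AUFBAU_ORDER, _CUM_BEFORE)
def filled_subshells_py_alt (electron_count : Int) : List (Int × String × Int) :=
  ((aufbauOrder.zip cumBefore).filter (fun p => electron_count > p.2)).map
    (fun p => (p.1.1, p.1.2.1, min p.1.2.2 (electron_count - p.2)))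

-- ===== PRECONDITION & SPEC =====
-- A raises ValueError for negative counts and for counts exceeding the total capacity 118
def Pre_filled_subshells_py (electron_count : Int) : Prop :=
  0 ≤ electron_count ∧ electron_count ≤ 118
instance (electron_count : Int) : Decidable (Pre_filled_subshells_py electron_count) := by unfold Pre_filled_subshells_py; infer_instance

def pvWitness_filled_subshells_py : Int := 26

def Spec_filled_subshells_py (electron_count : Int) (out : List (Int × String × Int)) : Prop := out = filled_subshells_py_alt electron_count
instance (electron_count : Int) (out : List (Int × String × Int)) : Decidable (Spec_filled_subshells_py electron_count out) := by unfold Spec_filled_subshells_py; infer_instance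

-- ===== CLAIM (what is proved, stated in full; the proofs are below) =====
def Claim_equal_filled_subshells_py : Prop := ∀ (electron_count : Int), Dom_filled_subshells_py electron_count → Pre_filled_subshells_py electron_count → Spec_filled_subshells_py electron_count (filled_subshells_py electron_count)

-- ===== LEMMAS AND PROOFS =====

-- the two ports agree on every admissible count 0..118 (finite check)
set_option maxRecDepth 10000 in
theorem agree_on_range :
    ∀ m ∈ List.range 119, filled_subshells_py (m : Int) = filled_subshells_py_alt (m : Int) := by
  decide

-- ===== VERDICT (by name: the statement is the Claim_ definition above) =====
theorem filled_subshells_py_spec : Claim_equal_filled_subshells_py := by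
  intro ec _ hpre
  unfold Spec_filled_subshells_py
  obtain ⟨h0, h118⟩ := hpre
  have hm : ec.toNat ∈ List.range 119 := by
    simp only [List.mem_range]; omega
  have := agree_on_range ec.toNat hm
  rwa [Int.toNat_of_nonneg h0] at this
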